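-- pv_equiv track=rewrite | github.com/anandarajRepo/BackTest | LongOnlyGrid.py | find_level_crosses
-- ===== SOURCE A (Python) =====
-- def find_level_crosses(prev_close, curr_low, curr_high, grid_levels):
--     """
--     Identify which grid levels the current candle crossed.
--
--     Returns:
--         crossed_down : list of level indices where price crossed downward
--                        (prev_close > level >= curr_low)
--         crossed_up   : list of level indices where price crossed upward
--                        (prev_close < level <= curr_high)
--     """
--     crossed_down = []
--     crossed_up = []
--     for idx, lvl in enumerate(grid_levels):
--         if prev_close > lvl >= curr_low:
--             crossed_down.append(idx)
--         if prev_close < lvl <= curr_high: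
--             crossed_up.append(idx)
--     return crossed_down, crossed_up
-- ===== SOURCE B (Python) =====
-- def _bisect_left(levels, x):
--     lo, hi = 0, len(levels)
--     while lo < hi:
--         mid = (lo + hi) // 2
--         if levels[mid] < x:
--             lo = mid + 1
--         else:
--             hi = mid
--     return lo
--
--
-- def _bisect_right(levels, x):
--     lo, hi = 0, len(levels)
--     while lo < hi:
--         mid = (lo + hi) // 2
--         if levels[mid] <= x:
--             lo = mid + 1
--         else:
--             hi = mid
--     return lo
--
--
-- def find_level_crosses(prev_close, curr_low, curr_high, grid_levels):
--     # Sort the levels once (keeping original indices), then binary-search the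
--     # window boundaries instead of testing every level against both conditions.
--     pairs = sorted(enumerate(grid_levels), key=lambda p: p[1])
--     levels = [lvl for _, lvl in pairs]
--     d_lo = _bisect_left(levels, curr_low)
--     d_hi = _bisect_left(levels, prev_close)
--     u_lo = _bisect_right(levels, prev_close)
--     u_hi = _bisect_right(levels, curr_high)
--     crossed_down = sorted(idx for idx, _ in pairs[d_lo:d_hi])
--     crossed_up = sorted(idx for idx, _ in pairs[u_lo:u_hi])
--     return crossed_down, crossed_up
-- ===== Notes on version B (the rewrite author's own statement) =====
-- stated objective: alternative
-- what changed: Instead of testing every level against both crossing conditions in one enumerate loop, B sorts the (index, level) pairs by level, locates the down- and up-crossing windows with hand-written binary searches for the four boundaries, slices the windows out and sorts the matched indices back into index order.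
import Mathlib
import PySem

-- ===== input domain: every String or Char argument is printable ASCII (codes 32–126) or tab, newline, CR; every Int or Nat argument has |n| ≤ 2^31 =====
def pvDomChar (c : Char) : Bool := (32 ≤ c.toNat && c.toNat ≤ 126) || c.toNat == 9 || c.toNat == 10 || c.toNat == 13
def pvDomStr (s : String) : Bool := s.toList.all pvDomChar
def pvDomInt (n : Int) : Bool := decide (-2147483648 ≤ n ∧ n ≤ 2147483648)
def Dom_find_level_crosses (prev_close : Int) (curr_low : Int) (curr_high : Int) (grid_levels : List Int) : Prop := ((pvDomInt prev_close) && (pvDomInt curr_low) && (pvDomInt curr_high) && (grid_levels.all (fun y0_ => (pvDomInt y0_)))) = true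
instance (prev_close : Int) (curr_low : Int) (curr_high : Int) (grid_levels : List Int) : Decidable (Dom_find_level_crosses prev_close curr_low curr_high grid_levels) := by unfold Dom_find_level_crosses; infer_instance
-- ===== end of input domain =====

-- B reorganises the work (sort by level + binary-searched windows + re-sort of indices);
-- same return value as A's single enumerate loop, objective: alternative algorithm.

-- ===== PORT A =====
def find_level_crosses (prev_close : Int) (curr_low : Int) (curr_high : Int) (grid_levels : List Int) : List Int × List Int :=
  (PySem.List.enumerate grid_levels 0).foldl
    (fun st p =>
      let st1 := if prev_close > p.2 ∧ p.2 ≥ curr_low then (st.1 ++ [p.1], st.2) else st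
      if prev_close < p.2 ∧ p.2 ≤ curr_high then (st1.1, st1.2 ++ [p.1]) else st1)
    ([], [])

-- ===== PORT B =====
-- B-side helper: hand-written bisect_left loop from Source B ('while lo < hi: …')
def pvBisectLeft (levels : List Int) (x : Int) (lo : Int) (hi : Int) : Int :=
  if _h : lo < hi then
    let mid := PySem.Int.floordiv (lo + hi) 2
    match PySem.List.pyGet? levels mid with
    | some v => if v < x then pvBisectLeft levels x (mid + 1) hi else pvBisectLeft levels x lo mid
    | none => lo   -- unreachable totality guard: callers keep 0 ≤ lo ≤ mid < hi ≤ levels.length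
  else lo
termination_by (hi - lo).toNat
decreasing_by
  all_goals
    have h2 := PySem.Int.floordiv_mul_add_mod (lo + hi) 2
    have h3 := PySem.Int.mod_nonneg (lo + hi) (b := 2) (by omega)
    have h4 := PySem.Int.mod_lt (lo + hi) (b := 2) (by omega)
    omega

-- B-side helper: hand-written bisect_right loop from Source B
def pvBisectRight (levels : List Int) (x : Int) (lo : Int) (hi : Int) : Int :=
  if _h : lo < hi then
    let mid := PySem.Int.floordiv (lo + hi) 2
    match PySem.List.pyGet? levels mid with
    | some v => if v ≤ x then pvBisectRight levels x (mid + 1) hi else pvBisectRight levels x lo mid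
    | none => lo   -- unreachable totality guard: callers keep 0 ≤ lo ≤ mid < hi ≤ levels.length
  else lo
termination_by (hi - lo).toNat
decreasing_by
  all_goals
    have h2 := PySem.Int.floordiv_mul_add_mod (lo + hi) 2
    have h3 := PySem.Int.mod_nonneg (lo + hi) (b := 2) (by omega)
    have h4 := PySem.Int.mod_lt (lo + hi) (b := 2) (by omega)
    omega

def find_level_crosses_alt (prev_close : Int) (curr_low : Int) (curr_high : Int) (grid_levels : List Int) : List Int × List Int :=
  let pairs := PySem.List.sorted (PySem.List.enumerate grid_levels 0) (fun p => p.2) false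
  let levels := pairs.map (fun p => p.2)
  let dLo := pvBisectLeft levels curr_low 0 (levels.length : Int)
  let dHi := pvBisectLeft levels prev_close 0 (levels.length : Int)
  let uLo := pvBisectRight levels prev_close 0 (levels.length : Int)
  let uHi := pvBisectRight levels curr_high 0 (levels.length : Int)
  let crossed_down := PySem.List.sorted ((PySem.List.slice pairs (some dLo) (some dHi)).map (fun p => p.1)) (fun x => x) false
  let crossed_up := PySem.List.sorted ((PySem.List.slice pairs (some uLo) (some uHi)).map (fun p => p.1)) (fun x => x) false
  (crossed_down, crossed_up)

-- ===== PRECONDITION & SPEC =====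
def Spec_find_level_crosses (prev_close : Int) (curr_low : Int) (curr_high : Int) (grid_levels : List Int) (out : List Int × List Int) : Prop := out = find_level_crosses_alt prev_close curr_low curr_high grid_levels
instance (prev_close : Int) (curr_low : Int) (curr_high : Int) (grid_levels : List Int) (out : List Int × List Int) : Decidable (Spec_find_level_crosses prev_close curr_low curr_high grid_levels out) := by unfold Spec_find_level_crosses; infer_instance

-- ===== CLAIM (what is proved, stated in full; the proofs are below) =====
def Claim_equal_find_level_crosses : Prop := ∀ (prev_close : Int) (curr_low : Int) (curr_high : Int) (grid_levels : List Int), Dom_find_level_crosses prev_close curr_low curr_high grid_levels → Spec_find_level_crosses prev_close curr_low curr_high grid_levels (find_level_crosses prev_close curr_low curr_high grid_levels)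

-- ===== LEMMAS AND PROOFS =====

-- countP of a positionally-determined predicate
theorem pvCountP_pos (p : Int → Bool) : ∀ (L : List Int) (m : Nat), m ≤ L.length →
    (∀ j (h : j < L.length), p L[j] = decide (j < m)) → L.countP p = m := by
  intro L
  induction L with
  | nil => intro m hm _; simp at hm ⊢; omega
  | cons a t ih =>
    intro m hm hpos
    cases m with
    | zero =>
      have ha : p a = false := by simpa using hpos 0 (by simp)
      have : t.countP p = 0 := by
        apply ih 0 (by omega)
        intro j h
        simpa using hpos (j+1) (by simpa using h)
      simp [ha, this]
    | succ k =>
      have ha : p a = true := by simpa using hpos 0 (by simp)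
      have ht : t.countP p = k := by
        apply ih k (by simpa using hm)
        intro j h
        have := hpos (j+1) (by simpa using h)
        simpa [Nat.succ_lt_succ_iff] using this
      simp [ha, ht]

-- sorted list: getElem monotone
theorem pvSortedGetMono (L : List Int) (hs : L.Pairwise (· ≤ ·)) {i j : Nat} (hij : i ≤ j)
    (hj : j < L.length) : L[i]'(by omega) ≤ L[j] := by
  rcases Nat.lt_or_ge i j with h | h
  · exact (List.pairwise_iff_getElem.mp hs) i j (by omega) hj h
  · have : i = j := by omega
    subst this; exact le_refl _
theorem pvBL_spec (levels : List Int) (x : Int) (hs : levels.Pairwise (· ≤ ·)) :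
    ∀ (n : Nat) (lo hi : Int), (hi - lo).toNat ≤ n → 0 ≤ lo → lo ≤ hi → hi ≤ (levels.length : Int) →
    (∀ j : Nat, (h : j < levels.length) → (j : Int) < lo → levels[j] < x) →
    (∀ j : Nat, (h : j < levels.length) → hi ≤ (j : Int) → ¬ levels[j] < x) →
    pvBisectLeft levels x lo hi = ((levels.countP (fun l => decide (l < x)) : Nat) : Int) := by
  intro n
  induction n with
  | zero =>
    intro lo hi hfuel h0 hlh hhl hlow hhigh
    have heq : lo = hi := by omega
    rw [pvBisectLeft, dif_neg (by omega)]
    have hc : levels.countP (fun l => decide (l < x)) = lo.toNat := by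
      apply pvCountP_pos
      · omega
      · intro j h
        by_cases hjlo : j < lo.toNat
        · simp [hlow j h (by omega), hjlo]
        · simp [hhigh j h (by omega), hjlo]
    omega
  | succ k ih =>
    intro lo hi hfuel h0 hlh hhl hlow hhigh
    by_cases hlt : lo < hi
    · rw [pvBisectLeft, dif_pos hlt]
      have hm := PySem.Int.floordiv_mul_add_mod (lo + hi) 2
      have h3 := PySem.Int.mod_nonneg (lo + hi) (b := 2) (by omega)
      have h4 := PySem.Int.mod_lt (lo + hi) (b := 2) (by omega)
      set md := PySem.Int.floordiv (lo + hi) 2 with hmd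
      have hmlo : lo ≤ md := by omega
      have hmhi : md < hi := by omega
      have hmn : md = ((md.toNat : Nat) : Int) := by omega
      have hmlen : md.toNat < levels.length := by omega
      rw [hmn]
      simp only [PySem.List.pyGet?_ofNat levels md.toNat hmlen]
      by_cases hv : levels[md.toNat] < x
      · rw [if_pos hv]
        apply ih (↑md.toNat + 1) hi (by omega) (by omega) (by omega) hhl
        · intro j h hj
          have : levels[j] ≤ levels[md.toNat] := pvSortedGetMono levels hs (by omega) hmlen
          omega
        · exact hhigh
      · rw [if_neg hv]
        apply ih lo (↑md.toNat) (by omega) h0 (by omega) (by omega) hlow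
        intro j h hj
        have : levels[md.toNat] ≤ levels[j] := pvSortedGetMono levels hs (by omega) h
        omega
    · rw [pvBisectLeft, dif_neg hlt]
      have heq : lo = hi := by omega
      have hc : levels.countP (fun l => decide (l < x)) = lo.toNat := by
        apply pvCountP_pos
        · omega
        · intro j h
          by_cases hjlo : j < lo.toNat
          · simp [hlow j h (by omega), hjlo]
          · simp [hhigh j h (by omega), hjlo]
      omega

theorem pvBR_spec (levels : List Int) (x : Int) (hs : levels.Pairwise (· ≤ ·)) :
    ∀ (n : Nat) (lo hi : Int), (hi - lo).toNat ≤ n → 0 ≤ lo → lo ≤ hi → hi ≤ (levels.length : Int) →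
    (∀ j : Nat, (h : j < levels.length) → (j : Int) < lo → levels[j] ≤ x) →
    (∀ j : Nat, (h : j < levels.length) → hi ≤ (j : Int) → ¬ levels[j] ≤ x) →
    pvBisectRight levels x lo hi = ((levels.countP (fun l => decide (l ≤ x)) : Nat) : Int) := by
  intro n
  induction n with
  | zero =>
    intro lo hi hfuel h0 hlh hhl hlow hhigh
    have heq : lo = hi := by omega
    rw [pvBisectRight, dif_neg (by omega)]
    have hc : levels.countP (fun l => decide (l ≤ x)) = lo.toNat := by
      apply pvCountP_pos
      · omega
      · intro j h
        by_cases hjlo : j < lo.toNat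
        · simp [hlow j h (by omega), hjlo]
        · simp [hhigh j h (by omega), hjlo]
    omega
  | succ k ih =>
    intro lo hi hfuel h0 hlh hhl hlow hhigh
    by_cases hlt : lo < hi
    · rw [pvBisectRight, dif_pos hlt]
      have hm := PySem.Int.floordiv_mul_add_mod (lo + hi) 2
      have h3 := PySem.Int.mod_nonneg (lo + hi) (b := 2) (by omega)
      have h4 := PySem.Int.mod_lt (lo + hi) (b := 2) (by omega)
      set md := PySem.Int.floordiv (lo + hi) 2 with hmd
      have hmlo : lo ≤ md := by omega
      have hmhi : md < hi := by omega
      have hmn : md = ((md.toNat : Nat) : Int) := by omega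
      have hmlen : md.toNat < levels.length := by omega
      rw [hmn]
      simp only [PySem.List.pyGet?_ofNat levels md.toNat hmlen]
      by_cases hv : levels[md.toNat] ≤ x
      · rw [if_pos hv]
        apply ih (↑md.toNat + 1) hi (by omega) (by omega) (by omega) hhl
        · intro j h hj
          have : levels[j] ≤ levels[md.toNat] := pvSortedGetMono levels hs (by omega) hmlen
          omega
        · exact hhigh
      · rw [if_neg hv]
        apply ih lo (↑md.toNat) (by omega) h0 (by omega) (by omega) hlow
        intro j h hj
        have : levels[md.toNat] ≤ levels[j] := pvSortedGetMono levels hs (by omega) h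
        omega
    · rw [pvBisectRight, dif_neg hlt]
      have heq : lo = hi := by omega
      have hc : levels.countP (fun l => decide (l ≤ x)) = lo.toNat := by
        apply pvCountP_pos
        · omega
        · intro j h
          by_cases hjlo : j < lo.toNat
          · simp [hlow j h (by omega), hjlo]
          · simp [hhigh j h (by omega), hjlo]
      omega

-- window lemma: in a list sorted by .2, dropping the p-count and taking the q-count is the filter
theorem pvWindow (q : Int → Bool) (hq : ∀ a b : Int, a ≤ b → q b = true → q a = true) :
    ∀ (L : List (Int × Int)), L.Pairwise (fun r s => r.2 ≤ s.2) →
    ∀ (p : Int → Bool), (∀ a b : Int, a ≤ b → p b = true → p a = true) →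
    (L.take (L.countP (fun r => q r.2))).drop (L.countP (fun r => p r.2))
      = L.filter (fun r => !p r.2 && q r.2) := by
  intro L
  induction L with
  | nil => intro _ p _; simp
  | cons a t ih =>
    intro hpw p hp
    have ha : ∀ s ∈ t, a.2 ≤ s.2 := fun s hs => (List.pairwise_cons.mp hpw).1 s hs
    have hpt : t.Pairwise (fun r s => r.2 ≤ s.2) := (List.pairwise_cons.mp hpw).2
    by_cases hpa : p a.2 = true
    · by_cases hqa : q a.2 = true
      · simp only [List.countP_cons, hpa, hqa, if_pos, List.take_succ_cons, List.drop_succ_cons,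
          List.filter_cons]
        simp [ih hpt p hp]
      · have hq0 : t.countP (fun r => q r.2) = 0 := by
          rw [List.countP_eq_zero]
          intro s hs
          simp only [Bool.not_eq_true]
          cases hqs : q s.2
          · rfl
          · exact absurd (hq a.2 s.2 (ha s hs) hqs) hqa
        have hfil : (a :: t).filter (fun r => !p r.2 && q r.2) = [] := by
          rw [List.filter_eq_nil_iff]
          intro s hs
          rcases List.mem_cons.mp hs with rfl | hst
          · simp [hqa]
          · have : q s.2 = false := by
              cases hqs : q s.2
              · rfl
              · exact absurd (hq a.2 s.2 (ha s hst) hqs) hqa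
            simp [this]
        simp [List.countP_cons, hqa, hq0, hfil]
    · have hp0 : t.countP (fun r => p r.2) = 0 := by
        rw [List.countP_eq_zero]
        intro s hs
        simp only [Bool.not_eq_true]
        cases hps : p s.2
        · rfl
        · exact absurd (hp a.2 s.2 (ha s hs) hps) hpa
      by_cases hqa : q a.2 = true
      · simp only [List.countP_cons, hpa, hqa, hp0]
        simp only [Bool.not_eq_true] at hpa
        simp [hpa, hqa]
        have hcong : t.filter (fun r => !p r.2 && q r.2) = t.filter (fun r => q r.2) := by
          apply List.filter_congr
          intro s hs
          have : p s.2 = false := by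
            cases hps : p s.2
            · rfl
            · exact absurd (hp a.2 s.2 (ha s hs) hps) (by simp [hpa])
          simp [this]
        rw [hcong]
        have ihf := ih hpt (fun _ => false) (by intro _ _ _ h; exact h)
        simpa using ihf
      · have hq0 : t.countP (fun r => q r.2) = 0 := by
          rw [List.countP_eq_zero]
          intro s hs
          simp only [Bool.not_eq_true]
          cases hqs : q s.2
          · rfl
          · exact absurd (hq a.2 s.2 (ha s hs) hqs) hqa
        have hfil : (a :: t).filter (fun r => !p r.2 && q r.2) = [] := by
          rw [List.filter_eq_nil_iff]
          intro s hs
          rcases List.mem_cons.mp hs with rfl | hst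
          · simp [hqa]
          · have : q s.2 = false := by
              cases hqs : q s.2
              · rfl
              · exact absurd (hq a.2 s.2 (ha s hst) hqs) hqa
            simp [this]
        simp [List.countP_cons, hqa, hq0, hfil]

-- A's loop, characterised: two independent append-if accumulators
theorem pvAfold (pc cl ch : Int) :
    ∀ (L : List (Int × Int)) (d u : List Int),
    L.foldl (fun st p =>
      let st1 := if pc > p.2 ∧ p.2 ≥ cl then (st.1 ++ [p.1], st.2) else st
      if pc < p.2 ∧ p.2 ≤ ch then (st1.1, st1.2 ++ [p.1]) else st1) (d, u)
    = (d ++ (L.filter (fun r => decide (pc > r.2 ∧ r.2 ≥ cl))).map (fun r => r.1),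
       u ++ (L.filter (fun r => decide (pc < r.2 ∧ r.2 ≤ ch))).map (fun r => r.1)) := by
  intro L
  induction L with
  | nil => simp
  | cons a t ih =>
    intro d u
    simp only [List.foldl_cons, List.filter_cons]
    by_cases h1 : pc > a.2 ∧ a.2 ≥ cl <;> by_cases h2 : pc < a.2 ∧ a.2 ≤ ch <;>
      simp [h1, h2, ih]

-- one output component of B equals the corresponding filtered enumerate of A
theorem pvSide (gl : List Int) (p q : Int → Bool)
    (hp : ∀ a b : Int, a ≤ b → p b = true → p a = true)
    (hq : ∀ a b : Int, a ≤ b → q b = true → q a = true)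
    (c : Int × Int → Bool) (hc : ∀ r : Int × Int, c r = (!p r.2 && q r.2)) :
    PySem.List.sorted ((PySem.List.slice (PySem.List.sorted (PySem.List.enumerate gl 0) (fun r => r.2) false)
        (some ((((PySem.List.sorted (PySem.List.enumerate gl 0) (fun r => r.2) false).countP (fun r => p r.2)) : Nat) : Int))
        (some ((((PySem.List.sorted (PySem.List.enumerate gl 0) (fun r => r.2) false).countP (fun r => q r.2)) : Nat) : Int))).map (fun r => r.1)) (fun x => x) false
      = ((PySem.List.enumerate gl 0).filter c).map (fun r => r.1) := by
  set pairs := PySem.List.sorted (PySem.List.enumerate gl 0) (fun r => r.2) false with hpairs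
  set cp := pairs.countP (fun r => p r.2) with hcp
  set cq := pairs.countP (fun r => q r.2) with hcq
  have hpw : pairs.Pairwise (fun r s => r.2 ≤ s.2) := PySem.List.sorted_pairwise _ _
  have hslice : PySem.List.slice pairs (some (cp : Int)) (some (cq : Int)) = (pairs.take cq).drop cp := by
    rw [PySem.List.slice_natCast]
    rcases Nat.lt_or_ge cq cp with h | h
    · have h1 : cq - cp = 0 := by omega
      rw [h1]
      simp only [List.take_zero]
      symm
      apply List.drop_eq_nil_of_le
      rw [List.length_take]
      omega
    · have h2 : cp + (cq - cp) = cq := by omega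
      rw [List.take_drop, h2]
  rw [hslice, pvWindow q hq pairs hpw p hp]
  have hfc : pairs.filter (fun r => !p r.2 && q r.2) = pairs.filter c := by
    apply List.filter_congr
    intro r _
    exact (hc r).symm
  rw [hfc]
  have hperm : (((PySem.List.enumerate gl 0).filter c).map (fun r => r.1)).Perm ((pairs.filter c).map (fun r => r.1)) := by
    rw [hpairs]
    exact (((PySem.List.sorted_perm (PySem.List.enumerate gl 0) (fun r => r.2) false).filter c).map (fun r => r.1)).symm
  have hpair : (((PySem.List.enumerate gl 0).filter c).map (fun r => r.1)).Pairwise (· < ·) := by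
    rw [List.pairwise_map]
    exact List.Pairwise.filter c
      (List.Pairwise.imp (by intro r s h; exact h) (PySem.List.pairwise_lt_enumerate gl 0))
  exact PySem.List.sorted_eq_of_perm_of_pairwise_lt (κ := Int) _ _ (fun x => x) hperm hpair

theorem main_eq (pc cl ch : Int) (gl : List Int) :
    (PySem.List.enumerate gl 0).foldl
      (fun st p =>
        let st1 := if pc > p.2 ∧ p.2 ≥ cl then (st.1 ++ [p.1], st.2) else st
        if pc < p.2 ∧ p.2 ≤ ch then (st1.1, st1.2 ++ [p.1]) else st1) ([], [])
    = (let pairs := PySem.List.sorted (PySem.List.enumerate gl 0) (fun p => p.2) false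
       let levels := pairs.map (fun p => p.2)
       let dLo := pvBisectLeft levels cl 0 (levels.length : Int)
       let dHi := pvBisectLeft levels pc 0 (levels.length : Int)
       let uLo := pvBisectRight levels pc 0 (levels.length : Int)
       let uHi := pvBisectRight levels ch 0 (levels.length : Int)
       let crossed_down := PySem.List.sorted ((PySem.List.slice pairs (some dLo) (some dHi)).map (fun p => p.1)) (fun x => x) false
       let crossed_up := PySem.List.sorted ((PySem.List.slice pairs (some uLo) (some uHi)).map (fun p => p.1)) (fun x => x) false
       (crossed_down, crossed_up)) := by
  rw [pvAfold]
  simp only [List.nil_append]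
  have hlev : ((PySem.List.sorted (PySem.List.enumerate gl 0) (fun p => p.2) false).map (fun p => p.2)).Pairwise (· ≤ ·) := by
    rw [List.pairwise_map]
    exact PySem.List.sorted_pairwise _ _
  set pairs := PySem.List.sorted (PySem.List.enumerate gl 0) (fun p => p.2) false with hpairs
  set levels := pairs.map (fun p => p.2) with hlevels
  have hlen : (levels.length : Int) - 0 = (levels.length : Int) := by omega
  have hBL : ∀ x : Int, pvBisectLeft levels x 0 (levels.length : Int)
      = ((levels.countP (fun l => decide (l < x)) : Nat) : Int) := by
    intro x
    apply pvBL_spec levels x hlev levels.length 0 (levels.length : Int) (by omega) (by omega) (by omega) (by omega)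
    · intro j h hj; omega
    · intro j h hj; omega
  have hBR : ∀ x : Int, pvBisectRight levels x 0 (levels.length : Int)
      = ((levels.countP (fun l => decide (l ≤ x)) : Nat) : Int) := by
    intro x
    apply pvBR_spec levels x hlev levels.length 0 (levels.length : Int) (by omega) (by omega) (by omega) (by omega)
    · intro j h hj; omega
    · intro j h hj; omega
  have hcnt : ∀ p : Int → Bool, levels.countP p = pairs.countP (fun r => p r.2) := by
    intro p
    rw [hlevels, List.countP_map]
    rfl
  simp only [hBL, hBR, hcnt]
  rw [Prod.mk.injEq]
  refine ⟨?_, ?_⟩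
  · rw [hpairs]
    symm
    apply pvSide gl (fun l => decide (l < cl)) (fun l => decide (l < pc))
    · intro a b hab h; simp only [decide_eq_true_eq] at h ⊢; omega
    · intro a b hab h; simp only [decide_eq_true_eq] at h ⊢; omega
    · intro r
      by_cases h1 : r.2 < cl <;> by_cases h2 : r.2 < pc <;>
        simp [h1, h2, gt_iff_lt, ge_iff_le, decide_eq_true_eq] <;> omega
  · rw [hpairs]
    symm
    apply pvSide gl (fun l => decide (l ≤ pc)) (fun l => decide (l ≤ ch))
    · intro a b hab h; simp only [decide_eq_true_eq] at h ⊢; omega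
    · intro a b hab h; simp only [decide_eq_true_eq] at h ⊢; omega
    · intro r
      by_cases h1 : r.2 ≤ pc <;> by_cases h2 : r.2 ≤ ch <;>
        simp [h1, h2, decide_eq_true_eq] <;> omega


-- ===== VERDICT (by name: the statement is the Claim_ definition above) =====
theorem find_level_crosses_spec : Claim_equal_find_level_crosses := by
  intro pc cl ch gl _
  unfold Spec_find_level_crosses find_level_crosses find_level_crosses_alt
  exact main_eq pc cl ch gl
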